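-- pv_equiv track=rewrite | github.com/GundalaNikhil/DSA | dsa-problems/verify_sorting_testcases_all_backup.py | locate_peak_queries
-- ===== SOURCE A (Python) =====
-- def locate_peak_queries(arr, queries):
--     """Locate peak with limited queries."""
--     results = []
--     for q in queries:
--         if 0 <= q < len(arr):
--             is_peak = True
--             if q > 0 and arr[q] <= arr[q-1]:
--                 is_peak = False
--             if q < len(arr) - 1 and arr[q] <= arr[q+1]:
--                 is_peak = False
--             results.append(1 if is_peak else 0)
--         else:
--             results.append(0)
--     return ' '.join(map(str, results))
-- ===== SOURCE B (Python) =====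
-- def locate_peak_queries(arr, queries):
--     """Locate peak with limited queries."""
--     n = len(arr)
--     peaks = set()
--     for i in range(n):
--         if (i == 0 or arr[i] > arr[i - 1]) and (i == n - 1 or arr[i] > arr[i + 1]):
--             peaks.add(i)
--     return ' '.join('1' if q in peaks else '0' for q in queries)
-- ===== Notes on version B (the rewrite author's own statement) =====
-- stated objective: alternative
-- what changed: B precomputes the set of peak indices in one pass over arr and answers each query by set membership, instead of A's per-query boundary/neighbour tests; out-of-range queries fall out naturally as non-members.
import Mathlib
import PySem

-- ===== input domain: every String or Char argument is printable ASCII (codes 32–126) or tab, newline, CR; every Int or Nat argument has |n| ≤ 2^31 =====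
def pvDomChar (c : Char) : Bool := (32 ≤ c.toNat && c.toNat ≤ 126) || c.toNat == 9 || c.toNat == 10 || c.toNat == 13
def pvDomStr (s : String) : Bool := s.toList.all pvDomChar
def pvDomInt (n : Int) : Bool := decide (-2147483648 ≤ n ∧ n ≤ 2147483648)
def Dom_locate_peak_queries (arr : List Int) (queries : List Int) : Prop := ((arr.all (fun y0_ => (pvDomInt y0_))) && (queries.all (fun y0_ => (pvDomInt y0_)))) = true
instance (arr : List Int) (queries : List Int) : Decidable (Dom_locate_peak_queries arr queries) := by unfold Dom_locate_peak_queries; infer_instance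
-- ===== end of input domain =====

-- B precomputes the peak-index set in one pass over arr and answers queries by membership,
-- instead of A's per-query boundary tests; same return value everywhere (both are total).

-- ===== PORT A =====
-- per-query body of A's loop: the value appended to results
def pqBitA (arr : List Int) (q : Int) : Int :=
  if 0 ≤ q ∧ q < (arr.length : Int) then
    let isPeak := true
    let isPeak := if q > 0 ∧ PySem.List.pyGetD arr q 0 ≤ PySem.List.pyGetD arr (q - 1) 0 then false else isPeak
    let isPeak := if q < (arr.length : Int) - 1 ∧ PySem.List.pyGetD arr q 0 ≤ PySem.List.pyGetD arr (q + 1) 0 then false else isPeak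
    if isPeak then 1 else 0
  else 0

def locate_peak_queries (arr : List Int) (queries : List Int) : String :=
  let results : List Int := queries.foldl (fun res q => res ++ [pqBitA arr q]) []
  PySem.Str.join " " (results.map PySem.Int.toStr)

-- ===== PORT B =====
-- B's one-pass peak predicate (strict greater than each existing neighbour)
def pqIsPeak (arr : List Int) (i : Int) : Bool :=
  (i == 0 || PySem.List.pyGetD arr (i - 1) 0 < PySem.List.pyGetD arr i 0) &&
  (i == (arr.length : Int) - 1 || PySem.List.pyGetD arr (i + 1) 0 < PySem.List.pyGetD arr i 0)

-- the set `peaks` built by B's first loop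
def pqPeaks (arr : List Int) : PySem.Set Int :=
  (PySem.List.pyRange 0 (arr.length : Int) 1).foldl
    (fun s i => if pqIsPeak arr i then PySem.Set.add s i else s) PySem.Set.empty

def locate_peak_queries_alt (arr : List Int) (queries : List Int) : String :=
  let peaks := pqPeaks arr
  PySem.Str.join " " (queries.map (fun q => if PySem.Set.contains peaks q then "1" else "0"))

-- ===== PRECONDITION & SPEC =====
def Spec_locate_peak_queries (arr : List Int) (queries : List Int) (out : String) : Prop := out = locate_peak_queries_alt arr queries
instance (arr : List Int) (queries : List Int) (out : String) : Decidable (Spec_locate_peak_queries arr queries out) := by unfold Spec_locate_peak_queries; infer_instance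

-- ===== CLAIM (what is proved, stated in full; the proofs are below) =====
def Claim_equal_locate_peak_queries : Prop := ∀ (arr : List Int) (queries : List Int), Dom_locate_peak_queries arr queries → Spec_locate_peak_queries arr queries (locate_peak_queries arr queries)

-- ===== LEMMAS AND PROOFS =====

-- membership in a "filtered add" fold of a set
theorem mem_foldl_add_if (c : Int → Bool) (l : List Int) (s : PySem.Set Int) (x : Int) :
    x ∈ l.foldl (fun s i => if c i then PySem.Set.add s i else s) s ↔ x ∈ s ∨ (x ∈ l ∧ c x = true) := by
  induction l generalizing s with
  | nil => simp
  | cons a t ih =>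
    simp only [List.foldl_cons, ih]
    by_cases ha : c a
    · simp only [ha, if_pos, PySem.Set.mem_add]
      constructor
      · rintro ((h | rfl) | ⟨h, hc⟩)
        · exact Or.inl h
        · exact Or.inr ⟨List.mem_cons_self, ha⟩
        · exact Or.inr ⟨List.mem_cons_of_mem _ h, hc⟩
      · rintro (h | ⟨h, hc⟩)
        · exact Or.inl (Or.inl h)
        · rcases List.mem_cons.mp h with rfl | h
          · exact Or.inl (Or.inr rfl)
          · exact Or.inr ⟨h, hc⟩
    · simp only [ha, Bool.false_eq_true]
      constructor
      · rintro (h | ⟨h, hc⟩)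
        · exact Or.inl h
        · exact Or.inr ⟨List.mem_cons_of_mem _ h, hc⟩
      · rintro (h | ⟨h, hc⟩)
        · exact Or.inl h
        · rcases List.mem_cons.mp h with rfl | h
          · exact absurd hc (by simp [ha])
          · exact Or.inr ⟨h, hc⟩

theorem mem_pqPeaks (arr : List Int) (q : Int) :
    q ∈ pqPeaks arr ↔ (0 ≤ q ∧ q < (arr.length : Int)) ∧ pqIsPeak arr q = true := by
  unfold pqPeaks
  rw [mem_foldl_add_if]
  simp [PySem.Set.empty, PySem.List.mem_pyRange_one, and_assoc]

theorem bitA_eq (arr : List Int) (q : Int) :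
    pqBitA arr q = if ((0 ≤ q ∧ q < (arr.length : Int)) ∧ pqIsPeak arr q = true) then 1 else 0 := by
  unfold pqBitA pqIsPeak
  split_ifs <;> (try rfl) <;> simp_all <;> omega

theorem bit_eq (arr : List Int) (q : Int) :
    PySem.Int.toStr (pqBitA arr q) = if PySem.Set.contains (pqPeaks arr) q then "1" else "0" := by
  have hmem : PySem.Set.contains (pqPeaks arr) q = true ↔
      ((0 ≤ q ∧ q < (arr.length : Int)) ∧ pqIsPeak arr q = true) := by
    simp [PySem.Set.contains, mem_pqPeaks]
  rw [bitA_eq]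
  by_cases hP : ((0 ≤ q ∧ q < (arr.length : Int)) ∧ pqIsPeak arr q = true)
  · rw [if_pos hP, if_pos (hmem.mpr hP)]
    decide
  · have hf : PySem.Set.contains (pqPeaks arr) q = false := by
      rcases Bool.eq_false_or_eq_true (PySem.Set.contains (pqPeaks arr) q) with h | h
      · exact absurd (hmem.mp h) hP
      · exact h
    rw [if_neg hP, hf]
    decide

-- ===== VERDICT (by name: the statement is the Claim_ definition above) =====
theorem locate_peak_queries_spec : Claim_equal_locate_peak_queries := by
  intro arr queries _
  unfold Spec_locate_peak_queries locate_peak_queries locate_peak_queries_alt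
  rw [PySem.List.foldl_append_singleton_eq_map]
  simp only [List.nil_append, List.map_map]
  congr 1
  exact List.map_congr_left (fun q _ => bit_eq arr q)
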